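-- pv_equiv track=rewrite | github.com/youbing5921/Baekjoon_yb | 백준/Silver/1388. 바닥 장식/바닥 장식.py | check_tile
-- ===== SOURCE A (Python) =====
-- def check_tile(floor, standard):
--     res = 0
--     for line in floor:
--         j = 0
--         while j < len(line):
--             if line[j] == standard:
--                 while j < len(line) and line[j] == standard:
--                     j += 1
--                 res += 1
--             else: j += 1
--     return res
-- ===== SOURCE B (Python) =====
-- def check_tile(floor, standard):
--     # Number of maximal runs of `standard` = (#positions that match)
--     # - (#adjacent pairs where both match): each run of length k contributes
--     # k matches and k-1 matched pairs, i.e. exactly 1 to the difference.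
--     matches = sum(1 for line in floor for ch in line if ch == standard)
--     pairs = sum(1 for line in floor for a, b in zip(line, line[1:])
--                 if a == standard and b == standard)
--     return matches - pairs
-- ===== Notes on version B (the rewrite author's own statement) =====
-- stated objective: alternative
-- what changed: Replaces A's stateful run-skipping scan with the stateless arithmetic identity runs = (#matching positions) - (#adjacent pairs that both match), computed as two staged counts and a subtraction.
import Mathlib
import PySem

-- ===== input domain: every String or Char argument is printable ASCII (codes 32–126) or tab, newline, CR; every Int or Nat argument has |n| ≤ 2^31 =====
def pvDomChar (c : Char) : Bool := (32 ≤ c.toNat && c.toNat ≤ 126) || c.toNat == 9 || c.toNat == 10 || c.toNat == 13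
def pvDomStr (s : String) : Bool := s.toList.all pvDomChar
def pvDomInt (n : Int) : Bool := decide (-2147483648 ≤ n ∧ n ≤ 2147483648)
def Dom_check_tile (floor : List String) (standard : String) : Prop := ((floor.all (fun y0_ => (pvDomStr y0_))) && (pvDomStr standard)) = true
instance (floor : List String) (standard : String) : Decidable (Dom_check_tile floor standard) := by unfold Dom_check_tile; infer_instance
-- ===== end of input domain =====

-- B replaces A's stateful run-skipping scan with the stateless identity
-- runs = (#matching positions) - (#adjacent matched pairs): two staged counts and a subtraction.

-- ===== PORT A =====
-- A's inner `while j < len(line) and line[j] == standard: j += 1` (skip the run)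
def pvSkipA (std : String) : List Char → List Char
  | [] => []
  | c :: rest => if String.ofList [c] == std then pvSkipA std rest else c :: rest

theorem pvSkipA_length_le (std : String) (l : List Char) : (pvSkipA std l).length ≤ l.length := by
  induction l with
  | nil => simp [pvSkipA]
  | cons c rest ih =>
    simp only [pvSkipA]
    split
    · exact Nat.le_succ_of_le ih
    · exact Nat.le_refl _

-- A's outer `while j < len(line)` over one line, returning the runs counted in it
def pvLoopA (std : String) : List Char → Int
  | [] => 0
  | c :: rest =>
    if String.ofList [c] == std then pvLoopA std (pvSkipA std rest) + 1
    else pvLoopA std rest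
termination_by l => l.length
decreasing_by
  · exact Nat.lt_succ_of_le (pvSkipA_length_le std rest)
  · exact Nat.lt_succ_self _

def check_tile (floor : List String) (standard : String) : Int :=
  floor.foldl (fun res line => res + pvLoopA standard line.toList) 0

-- ===== PORT B =====
-- `sum(1 for line in floor for ch in line if ch == standard)`
def pvMatches (std : String) (l : List Char) : Int :=
  (l.countP (fun c => String.ofList [c] == std) : Int)

-- `sum(1 for line in floor for a, b in zip(line, line[1:]) if a == standard and b == standard)`
def pvPairs (std : String) (l : List Char) : Int :=
  ((l.zip l.tail).countP (fun p => (String.ofList [p.1] == std) && (String.ofList [p.2] == std)) : Int)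

def check_tile_alt (floor : List String) (standard : String) : Int :=
  (floor.map (fun line => pvMatches standard line.toList)).sum
    - (floor.map (fun line => pvPairs standard line.toList)).sum

-- ===== PRECONDITION & SPEC =====
def Spec_check_tile (floor : List String) (standard : String) (out : Int) : Prop := out = check_tile_alt floor standard
instance (floor : List String) (standard : String) (out : Int) : Decidable (Spec_check_tile floor standard out) := by unfold Spec_check_tile; infer_instance

-- ===== CLAIM (what is proved, stated in full; the proofs are below) =====
def Claim_equal_check_tile : Prop := ∀ (floor : List String) (standard : String), Dom_check_tile floor standard → Spec_check_tile floor standard (check_tile floor standard)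

-- ===== LEMMAS AND PROOFS =====

-- whether the first character matches
def pvHead (std : String) : List Char → Bool
  | [] => false
  | c :: _ => String.ofList [c] == std

-- run-start count of a line given the previous-position match flag
def pvScan (std : String) (prev : Bool) : List Char → Int
  | [] => 0
  | c :: rest =>
    (if (String.ofList [c] == std) && !prev then 1 else 0) + pvScan std (String.ofList [c] == std) rest

theorem pvLoopA_scan (std : String) (l : List Char) :
    pvLoopA std l = pvScan std false l ∧ pvLoopA std (pvSkipA std l) = pvScan std true l := by
  induction l with
  | nil => simp [pvLoopA, pvSkipA, pvScan]
  | cons c rest ih =>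
    by_cases h : (String.ofList [c] == std) = true
    · constructor
      · rw [pvLoopA]
        simp only [h, if_pos, pvScan, Bool.not_false, Bool.and_true, ih.2]
        omega
      · rw [pvSkipA]
        simp only [h, if_pos, pvScan, Bool.not_true, Bool.and_false, ih.2]
        simp
    · constructor
      · rw [pvLoopA]
        simp only [h, pvScan, ih.1]
        simp
      · rw [pvSkipA, if_neg h, pvLoopA, if_neg h]
        simp only [pvScan, h, ih.1]
        simp

theorem pvScan_eq (std : String) (l : List Char) :
    ∀ prev : Bool, pvScan std prev l
      = pvMatches std l - pvPairs std l - (if prev && pvHead std l then 1 else 0) := by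
  induction l with
  | nil => intro prev; simp [pvScan, pvMatches, pvPairs, pvHead]
  | cons c rest ih =>
    intro prev
    cases rest with
    | nil =>
      simp only [pvScan, pvMatches, pvPairs, pvHead, List.countP_cons, List.countP_nil,
        List.zip, List.tail]
      by_cases h : (String.ofList [c] == std) = true <;> cases prev <;> simp [h] <;> omega
    | cons d r =>
      have hp : pvPairs std (c :: d :: r)
          = (if (String.ofList [c] == std) && (String.ofList [d] == std) then 1 else 0)
            + pvPairs std (d :: r) := by
        simp only [pvPairs, List.tail, List.zip_cons_cons, List.countP_cons]
        split <;> simp_all <;> omega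
      have hm : pvMatches std (c :: d :: r)
          = (if String.ofList [c] == std then 1 else 0) + pvMatches std (d :: r) := by
        simp only [pvMatches, List.countP_cons]
        split <;> simp_all <;> omega
      rw [pvScan, ih, hp, hm]
      simp only [pvHead]
      by_cases h1 : (String.ofList [c] == std) = true <;>
        by_cases h2 : (String.ofList [d] == std) = true <;>
          cases prev <;> simp [h1, h2] <;> omega

theorem per_line_eq (std : String) (l : List Char) :
    pvLoopA std l = pvMatches std l - pvPairs std l := by
  rw [(pvLoopA_scan std l).1, pvScan_eq]
  simp

theorem sum_sub (f g : String → Int) (l : List String) :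
    (l.map fun x => f x - g x).sum = (l.map f).sum - (l.map g).sum := by
  induction l with
  | nil => simp
  | cons x xs ih => simp [ih]; ring

theorem foldl_sum (f : String → Int) (floor : List String) :
    ∀ a : Int, floor.foldl (fun res line => res + f line) a = a + (floor.map f).sum := by
  induction floor with
  | nil => intro a; simp
  | cons x xs ih => intro a; simp [List.foldl_cons, ih]; ring

-- ===== VERDICT (by name: the statement is the Claim_ definition above) =====
theorem check_tile_spec : Claim_equal_check_tile := by
  intro floor standard _
  unfold Spec_check_tile check_tile check_tile_alt
  rw [foldl_sum]
  have : ∀ line : String, (fun line => pvLoopA standard line.toList) line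
      = pvMatches standard line.toList - pvPairs standard line.toList := fun line =>
    per_line_eq standard line.toList
  simp only [List.map_congr_left (fun line _ => this line),
    sum_sub (fun line => pvMatches standard line.toList) (fun line => pvPairs standard line.toList)]
  ring
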